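-- pv_equiv track=rewrite | github.com/xyxwangkai/deer-flow | skills/custom/merlin-cli/job-operations/scripts/download_and_compress_logs.py | _ensure_pairs
-- ===== SOURCE A (Python) =====
-- from typing import Dict, Iterable, List, Optional, Sequence, Set, Tuple
--
-- def _ensure_pairs(args: Sequence[str]) -> List[Tuple[str, str]]:
--     if len(args) == 0 or len(args) % 2 != 0:
--         raise RuntimeError("USAGE: download_and_compress_logs.py JOB1 URL1 [JOB2 URL2 ...]")
--     pairs: List[Tuple[str, str]] = []
--     it = iter(args)
--     for job in it:
--         url = next(it)
--         pairs.append((job, url))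
--     return pairs
-- ===== SOURCE B (Python) =====
-- from typing import List, Sequence, Tuple
--
--
-- def _ensure_pairs(args: Sequence[str]) -> List[Tuple[str, str]]:
--     if len(args) == 0 or len(args) % 2 != 0:
--         raise RuntimeError("USAGE: download_and_compress_logs.py JOB1 URL1 [JOB2 URL2 ...]")
--     return list(zip(args[::2], args[1::2]))
-- ===== Notes on version B (the rewrite author's own statement) =====
-- stated objective: idiomatic
-- what changed: Replaces the manual iterator loop that consumes two elements at a time with two strided slices (even- and odd-indexed elements) zipped pairwise.
import Mathlib
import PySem

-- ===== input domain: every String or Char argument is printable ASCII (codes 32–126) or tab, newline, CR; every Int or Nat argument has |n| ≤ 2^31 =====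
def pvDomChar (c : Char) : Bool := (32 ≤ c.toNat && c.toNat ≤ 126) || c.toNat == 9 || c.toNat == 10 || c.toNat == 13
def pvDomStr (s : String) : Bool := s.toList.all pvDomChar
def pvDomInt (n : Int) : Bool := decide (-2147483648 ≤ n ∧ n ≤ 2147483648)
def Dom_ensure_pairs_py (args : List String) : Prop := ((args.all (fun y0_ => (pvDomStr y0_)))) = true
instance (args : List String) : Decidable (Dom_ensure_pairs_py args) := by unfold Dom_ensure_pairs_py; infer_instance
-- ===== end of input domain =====

-- B pairs the arguments by zipping the even-indexed slice with the odd-indexed slice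
-- instead of consuming an iterator two elements at a time (objective: idiomatic).


-- ===== PORT A =====
-- the 'for job in it: url = next(it); pairs.append((job, url))' loop; the singleton
-- case (next(it) raising StopIteration) is unreachable inside Pre_ (the length guard fired)
def pvPairsLoopA (acc : List (String × String)) : List String → List (String × String)
  | [] => acc
  | [_] => acc
  | j :: u :: rest => pvPairsLoopA (acc ++ [(j, u)]) rest

def ensure_pairs_py (args : List String) : List (String × String) :=
  if args.length = 0 ∨ args.length % 2 ≠ 0 then []   -- raise RuntimeError (excluded by Pre_)
  else pvPairsLoopA [] args

-- ===== PORT B =====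
def ensure_pairs_py_alt (args : List String) : List (String × String) :=
  if args.length = 0 ∨ args.length % 2 ≠ 0 then []   -- raise RuntimeError (excluded by Pre_)
  else ((PySem.List.slice? args none none 2).getD []).zip
       ((PySem.List.slice? args (some 1) none 2).getD [])

-- ===== PRECONDITION & SPEC =====
-- Pre_ excludes exactly the inputs on which A raises RuntimeError: empty or odd-length lists.
def Pre_ensure_pairs_py (args : List String) : Prop :=
  args ≠ [] ∧ args.length % 2 = 0
instance (args : List String) : Decidable (Pre_ensure_pairs_py args) := by
  unfold Pre_ensure_pairs_py; infer_instance

def pvWitness_ensure_pairs_py : List String := ["job1", "http://u1", "job2", "http://u2"]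

def Spec_ensure_pairs_py (args : List String) (out : List (String × String)) : Prop := out = ensure_pairs_py_alt args
instance (args : List String) (out : List (String × String)) : Decidable (Spec_ensure_pairs_py args out) := by unfold Spec_ensure_pairs_py; infer_instance

-- ===== CLAIM (what is proved, stated in full; the proofs are below) =====
def Claim_equal_ensure_pairs_py : Prop := ∀ (args : List String), Dom_ensure_pairs_py args → Pre_ensure_pairs_py args → Spec_ensure_pairs_py args (ensure_pairs_py args)

-- ===== LEMMAS AND PROOFS =====

/-- every other element starting from the head: proof-side characterisation of xs[::2] -/
def pvStride2 : List String → List String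
  | [] => []
  | [a] => [a]
  | a :: _ :: r => a :: pvStride2 r

theorem pvFmEven : ∀ (xs : List String),
    (List.range ((xs.length + 1) / 2)).filterMap (fun k => xs[2 * k]?) = pvStride2 xs
  | [] => by simp [pvStride2]
  | [a] => by simp [pvStride2, List.range_succ]
  | a :: b :: r => by
    have ih := pvFmEven r
    have hc : ((a :: b :: r).length + 1) / 2 = (r.length + 1) / 2 + 1 := by
      simp only [List.length_cons]; omega
    rw [hc, List.range_succ_eq_map, List.filterMap_cons, List.filterMap_map]
    simp only [Nat.mul_zero, List.getElem?_cons_zero, Function.comp]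
    have hidx : ∀ k : ℕ, (a :: b :: r)[2 * (k + 1)]? = r[2 * k]? := by
      intro k
      have : 2 * (k + 1) = 2 * k + 1 + 1 := by omega
      rw [this, List.getElem?_cons_succ, List.getElem?_cons_succ]
    simp only [hidx, ih]
    rfl

theorem pvFmOdd : ∀ (xs : List String),
    (List.range (xs.length / 2)).filterMap (fun k => xs[2 * k + 1]?) = pvStride2 xs.tail
  | [] => by simp [pvStride2]
  | [a] => by norm_num [pvStride2]
  | a :: b :: r => by
    have ih := pvFmOdd r
    have hc : (a :: b :: r).length / 2 = r.length / 2 + 1 := by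
      simp only [List.length_cons]; omega
    rw [hc, List.range_succ_eq_map, List.filterMap_cons, List.filterMap_map]
    have hidx : ∀ k : ℕ, (a :: b :: r)[2 * Nat.succ k + 1]? = r[2 * k + 1]? := by
      intro k
      have h2 : 2 * Nat.succ k + 1 = 2 * k + 1 + 1 + 1 := by omega
      rw [h2, List.getElem?_cons_succ, List.getElem?_cons_succ]
    simp only [Function.comp_def, hidx, ih]
    norm_num
    cases r <;> rfl

theorem pvSliceEvens (xs : List String) :
    (PySem.List.slice? xs none none 2).getD [] = pvStride2 xs := by
  have h : PySem.List.slice? xs none none 2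
      = some ((List.range ((xs.length + 1) / 2)).filterMap (fun k => xs[2 * k]?)) := by
    simp only [PySem.List.slice?, PySem.List.sliceIndices, reduceIte, Int.reduceLT,
      Int.reduceEq, Int.reduceNeg]
    have h1 : (if (0:ℤ) < ↑xs.length then (((xs.length : ℤ) - 0 + 2 - 1) / 2).toNat else 0)
        = (xs.length + 1) / 2 := by split <;> omega
    rw [h1]
    refine congrArg some (List.filterMap_congr ?_)
    intro k _
    congr 1
    omega
  rw [h, Option.getD_some, pvFmEven]

theorem pvSliceOdds (xs : List String) :
    (PySem.List.slice? xs (some 1) none 2).getD [] = pvStride2 xs.tail := by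
  cases xs with
  | nil => rfl
  | cons a r =>
    have h : PySem.List.slice? (a :: r) (some 1) none 2
        = some ((List.range ((a :: r).length / 2)).filterMap (fun k => (a :: r)[2 * k + 1]?)) := by
      simp only [PySem.List.slice?, PySem.List.sliceIndices, reduceIte, Int.reduceLT,
        Int.reduceEq, Int.reduceNeg]
      have hmin : min (1:ℤ) ((a :: r).length : ℤ) = 1 := by
        simp only [List.length_cons]; omega
      rw [hmin]
      have h1 : (if (1:ℤ) < ↑(a :: r).length
          then ((((a :: r).length : ℤ) - 1 + 2 - 1) / 2).toNat else 0) = (a :: r).length / 2 := by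
        simp only [List.length_cons]; split <;> omega
      rw [h1]
      refine congrArg some (List.filterMap_congr ?_)
      intro k _
      congr 1
      omega
    rw [h, Option.getD_some, pvFmOdd]

theorem pvLoopA_zip : ∀ (xs : List String) (acc : List (String × String)),
    pvPairsLoopA acc xs = acc ++ (pvStride2 xs).zip (pvStride2 xs.tail)
  | [], acc => by simp [pvPairsLoopA, pvStride2]
  | [a], acc => by simp [pvPairsLoopA, pvStride2]
  | j :: u :: r, acc => by
    have ih := pvLoopA_zip r (acc ++ [(j, u)])
    have hu : pvStride2 (u :: r) = u :: pvStride2 r.tail := by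
      cases r <;> rfl
    simp only [pvPairsLoopA, ih, List.tail_cons, pvStride2, hu, List.zip_cons_cons,
      List.append_assoc, List.singleton_append]

-- ===== VERDICT (by name: the statement is the Claim_ definition above) =====
theorem ensure_pairs_py_spec : Claim_equal_ensure_pairs_py := by
  intro args _ hpre
  obtain ⟨hne, hmod⟩ := hpre
  unfold Spec_ensure_pairs_py ensure_pairs_py ensure_pairs_py_alt
  have hlen : ¬ (args.length = 0 ∨ args.length % 2 ≠ 0) := by
    push Not
    exact ⟨fun h => hne (List.eq_nil_of_length_eq_zero h), hmod⟩
  rw [if_neg hlen, if_neg hlen, pvSliceEvens, pvSliceOdds, pvLoopA_zip]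
  simp
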